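-- pv_equiv track=rewrite | github.com/PeePeeDante/cs2020demo | codeitsuisse/routes/inventory.py | getOperations
-- ===== SOURCE A (Python) =====
-- def getOperations(key, search_wd):
--
--     keyLen = len(key)  # input
--     wdLen = len(search_wd)  # item
--
--     dp = [None]*(wdLen+1)
--     op = [None]*(wdLen+1)
--     for i in range(wdLen+1):
--         dp[i] = [1000000]*(keyLen+1)
--         op[i] = [None]*(keyLen+1)
--
--     dp[0][0] = 0
--     op[0][0] = '0'
--
--     for i in range(1, wdLen+1):
--         dp[i][0] = i
--         op[i][0] = '-'
--
--     for i in range(1, keyLen+1):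
--         dp[0][i] = i
--         op[0][i] = '+'
--
--     for i in range(1, wdLen+1):
--         for j in range(1, keyLen+1):
--             cost = dp[i-1][j-1]
--             op[i][j] = '0'
--             if (key[j-1].lower() != search_wd[i-1].lower()):
--                 cost += 1
--                 op[i][j] = 's'
--
--             inscost = dp[i][j-1]+1
--             if (inscost <= cost):
--                 cost = inscost
--                 op[i][j] = '+'
--
--             delcost = dp[i-1][j]+1
--             if (delcost <= cost):
--                 cost = delcost
--                 op[i][j] = '-'
--
--             dp[i][j] = cost
--
--     result = ""
--     i = wdLen
--     j = keyLen
--     while (i > 0 or j > 0):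
--         if (op[i][j] == '0'):
--             result = search_wd[i-1] + result
--             i -= 1
--             j -= 1
--
--         elif (op[i][j] == '+'):
--             result = '+' + key[j-1] + result
--             j -= 1
--
--         elif (op[i][j] == '-'):
--             result = '-' + search_wd[i-1] + result
--             i -= 1
--
--         elif (op[i][j] == 's'):
--             result = key[j-1] + result
--             i -= 1
--             j -= 1
--
--     return [result], [dp[wdLen][keyLen]]
-- ===== SOURCE B (Python) =====
-- def getOperations(key, search_wd):
--     keyLen = len(key)
--     wdLen = len(search_wd)
--
--     # forward DP: every cell carries (cost, alignment-so-far); only one row is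
--     # kept at a time, there is no op table and no traceback phase at all.
--     prev = [(0, "")]
--     for j in range(1, keyLen + 1):
--         prev.append((j, prev[j - 1][1] + '+' + key[j - 1]))
--
--     for i in range(1, wdLen + 1):
--         cur = [(i, prev[0][1] + '-' + search_wd[i - 1])]
--         for j in range(1, keyLen + 1):
--             same = key[j - 1].lower() == search_wd[i - 1].lower()
--             sub = prev[j - 1]
--             subCost = sub[0] if same else sub[0] + 1
--             ins = cur[j - 1]
--             dele = prev[j]
--             if dele[0] + 1 <= min(subCost, ins[0] + 1):
--                 cur.append((dele[0] + 1, dele[1] + '-' + search_wd[i - 1]))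
--             elif ins[0] + 1 <= subCost:
--                 cur.append((ins[0] + 1, ins[1] + '+' + key[j - 1]))
--             else:
--                 cur.append((subCost, sub[1] + (search_wd[i - 1] if same else key[j - 1])))
--         prev = cur
--
--     cost, alignment = prev[keyLen]
--     return [alignment], [cost]
-- ===== Notes on version B (the rewrite author's own statement) =====
-- stated objective: simpler
-- what changed: B replaces A's two full tables (cost + op) and backward traceback loop with a single forward dynamic-programming pass in which each cell carries its (cost, alignment string) pair and only one rolling row is kept; the answer is read directly from the last cell, so the op table and the traceback phase disappear entirely.
import Mathlib
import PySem

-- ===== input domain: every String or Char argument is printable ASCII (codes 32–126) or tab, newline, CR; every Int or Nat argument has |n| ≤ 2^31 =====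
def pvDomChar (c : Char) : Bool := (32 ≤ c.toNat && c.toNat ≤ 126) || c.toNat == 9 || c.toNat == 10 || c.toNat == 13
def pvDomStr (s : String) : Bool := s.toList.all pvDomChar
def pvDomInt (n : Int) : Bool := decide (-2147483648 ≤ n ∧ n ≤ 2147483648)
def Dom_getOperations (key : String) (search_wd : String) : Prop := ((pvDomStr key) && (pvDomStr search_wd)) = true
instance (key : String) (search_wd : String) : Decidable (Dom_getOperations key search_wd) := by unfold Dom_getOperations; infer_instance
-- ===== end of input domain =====

-- B replaces A's cost+op tables and backward traceback with ONE forward DP pass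
-- whose cells carry (cost, alignment string), keeping a single rolling row
-- (objective: simpler — no op table, no traceback phase).

-- Python's `t[i][j]` read and `t[i][j] = v` write on a list of lists.  Every index
-- this program reads or writes is a non-negative in-range loop index, so pyGetD's
-- default and List.set's out-of-range no-op are never exercised (exact here).
def pvGet2 {α : Type} (t : List (List α)) (i j : Int) (d : α) : α :=
  PySem.List.pyGetD (PySem.List.pyGetD t i []) j d

def pvSet2 {α : Type} (t : List (List α)) (i j : Int) (v : α) : List (List α) :=
  t.set i.toNat ((t.getD i.toNat []).set j.toNat v)

-- ===== PORT A =====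
-- A's backtracking `while` loop.  fuel = wdLen+keyLen bounds its iterations
-- (each taken branch decreases i+j by at least 1).  The final `else` corresponds
-- to Python's nonexistent fifth case, where the Python loop would spin forever;
-- no reachable state hits it (every visited cell holds one of the four op chars).
def pvWalkA (k wd : List Char) (op : List (List Char)) : Nat → Int → Int → List Char → List Char
  | 0, _, _, result => result
  | fuel+1, i, j, result =>
    if i > 0 ∨ j > 0 then
      if pvGet2 op i j '?' = '0' then
        pvWalkA k wd op fuel (i-1) (j-1) (PySem.List.pyGetD wd (i-1) ' ' :: result)
      else if pvGet2 op i j '?' = '+' then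
        pvWalkA k wd op fuel i (j-1) ('+' :: PySem.List.pyGetD k (j-1) ' ' :: result)
      else if pvGet2 op i j '?' = '-' then
        pvWalkA k wd op fuel (i-1) j ('-' :: PySem.List.pyGetD wd (i-1) ' ' :: result)
      else if pvGet2 op i j '?' = 's' then
        pvWalkA k wd op fuel (i-1) (j-1) (PySem.List.pyGetD k (j-1) ' ' :: result)
      else result
    else result

-- the body of A's inner `for j` loop: the sequential cost/op chain, in A's order
-- ('s' mark, then '+' if inscost ≤ cost, then '-' if delcost ≤ cost)
def pvStepA (k wd : List Char) (i : Int)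
    (st : List (List Int) × List (List Char)) (j : Int) :
    List (List Int) × List (List Char) :=
  let dp := st.1
  let op := st.2
  let co := if PySem.Chars.lowerChar (PySem.List.pyGetD k (j-1) ' ')
               ≠ PySem.Chars.lowerChar (PySem.List.pyGetD wd (i-1) ' ')
            then (pvGet2 dp (i-1) (j-1) 0 + 1, 's') else (pvGet2 dp (i-1) (j-1) 0, '0')
  let inscost := pvGet2 dp i (j-1) 0 + 1
  let co := if inscost ≤ co.1 then (inscost, '+') else co
  let delcost := pvGet2 dp (i-1) j 0 + 1
  let co := if delcost ≤ co.1 then (delcost, '-') else co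
  (pvSet2 dp i j co.1, pvSet2 op i j co.2)

def getOperations (key : String) (search_wd : String) : List String × List Int :=
  let k := key.toList
  let wd := search_wd.toList
  let keyLen : Int := k.length
  let wdLen : Int := wd.length
  -- the allocation loop fills every row: dp[i] = [1000000]*(keyLen+1),
  -- op[i] = [None]*(keyLen+1) ('?' models Python's None, which is never read back)
  let dp : List (List Int) := List.replicate (wd.length+1) (List.replicate (k.length+1) 1000000)
  let op : List (List Char) := List.replicate (wd.length+1) (List.replicate (k.length+1) '?')
  let dp := pvSet2 dp 0 0 0
  let op := pvSet2 op 0 0 '0'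
  let st := (PySem.List.pyRange 1 (wdLen+1)).foldl
      (fun st i => (pvSet2 st.1 i 0 i, pvSet2 st.2 i 0 '-')) (dp, op)
  let st := (PySem.List.pyRange 1 (keyLen+1)).foldl
      (fun st i => (pvSet2 st.1 0 i i, pvSet2 st.2 0 i '+')) st
  let st := (PySem.List.pyRange 1 (wdLen+1)).foldl
      (fun st i => (PySem.List.pyRange 1 (keyLen+1)).foldl (pvStepA k wd i) st) st
  let result := pvWalkA k wd st.2 (wdLen + keyLen).toNat wdLen keyLen []
  ([String.ofList result], [pvGet2 st.1 wdLen keyLen 0])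

-- ===== PORT B =====
-- the append step of B's first loop: prev.append((j, prev[j-1][1] + '+' + key[j-1]))
def pvRow0Step (k : List Char) (prev : List (Int × List Char)) (j : Int) :
    List (Int × List Char) :=
  prev ++ [(j, (PySem.List.pyGetD prev (j-1) (0, [])).2 ++ ['+', PySem.List.pyGetD k (j-1) ' '])]

-- the body of B's inner `for j` loop: pick delete / insert / substitute-or-match
-- (in that tie-break order) and append (cost, string) to the current row
def pvStepB (k wd : List Char) (prev : List (Int × List Char)) (i : Int)
    (cur : List (Int × List Char)) (j : Int) : List (Int × List Char) :=
  let same := PySem.Chars.lowerChar (PySem.List.pyGetD k (j-1) ' ')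
                == PySem.Chars.lowerChar (PySem.List.pyGetD wd (i-1) ' ')
  let sub := PySem.List.pyGetD prev (j-1) (0, [])
  let subCost := if same then sub.1 else sub.1 + 1
  let ins := PySem.List.pyGetD cur (j-1) (0, [])
  let dele := PySem.List.pyGetD prev j (0, [])
  if dele.1 + 1 ≤ min subCost (ins.1 + 1) then
    cur ++ [(dele.1 + 1, dele.2 ++ ['-', PySem.List.pyGetD wd (i-1) ' '])]
  else if ins.1 + 1 ≤ subCost then
    cur ++ [(ins.1 + 1, ins.2 ++ ['+', PySem.List.pyGetD k (j-1) ' '])]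
  else
    cur ++ [(subCost, sub.2 ++ [if same then PySem.List.pyGetD wd (i-1) ' '
                                else PySem.List.pyGetD k (j-1) ' '])]

def getOperations_alt (key : String) (search_wd : String) : List String × List Int :=
  let k := key.toList
  let wd := search_wd.toList
  let keyLen : Int := k.length
  let wdLen : Int := wd.length
  -- prev = [(0, "")] then the j-loop extends it to row 0
  let prev : List (Int × List Char) := [(0, [])]
  let prev := (PySem.List.pyRange 1 (keyLen+1)).foldl (pvRow0Step k) prev
  -- each outer iteration builds cur from scratch (col 0) and the inner loop, then prev = cur
  let prev := (PySem.List.pyRange 1 (wdLen+1)).foldl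
      (fun prev i => (PySem.List.pyRange 1 (keyLen+1)).foldl (pvStepB k wd prev i)
        [(i, (PySem.List.pyGetD prev 0 (0, [])).2 ++ ['-', PySem.List.pyGetD wd (i-1) ' '])]) prev
  let fin := PySem.List.pyGetD prev keyLen (0, [])
  ([String.ofList fin.2], [fin.1])

-- ===== PRECONDITION & SPEC =====
def Spec_getOperations (key : String) (search_wd : String) (out : List String × List Int) : Prop := out = getOperations_alt key search_wd
instance (key : String) (search_wd : String) (out : List String × List Int) : Decidable (Spec_getOperations key search_wd out) := by unfold Spec_getOperations; infer_instance

-- ===== CLAIM (what is proved, stated in full; the proofs are below) =====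
def Claim_equal_getOperations : Prop := ∀ (key : String) (search_wd : String), Dom_getOperations key search_wd → Spec_getOperations key search_wd (getOperations key search_wd)

-- ===== LEMMAS AND PROOFS =====

def pvUpd {α : Type} (t : Int → Int → α) (i j : Int) (v : α) : Int → Int → α :=
  fun a b => if a = i ∧ b = j then v else t a b
def pvMk {α : Type} (m n : Nat) (f : Int → Int → α) : List (List α) :=
  (List.range (m+1)).map (fun (a : Nat) => (List.range (n+1)).map (fun (b : Nat) => f (a : Int) (b : Int)))

theorem pvGet2_mk {α : Type} (m n : Nat) (f : Int → Int → α) (a b : Int) (d : α)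
    (h0a : 0 ≤ a) (ham : a ≤ (m : Int)) (h0b : 0 ≤ b) (hbn : b ≤ (n : Int)) :
    pvGet2 (pvMk m n f) a b d = f a b := by
  unfold pvGet2 pvMk
  rw [PySem.List.pyGetD_of_nonneg _ _ h0a,
    PySem.List.getD_map_range _ _ _ _ (by omega),
    PySem.List.pyGetD_of_nonneg _ _ h0b,
    PySem.List.getD_map_range _ _ _ _ (by omega)]
  congr 1 <;> omega

theorem pvSet2_mk {α : Type} (m n : Nat) (f : Int → Int → α) (i j : Int) (v : α)
    (h0i : 0 ≤ i) (him : i ≤ (m : Int)) (h0j : 0 ≤ j) (hjn : j ≤ (n : Int)) :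
    pvSet2 (pvMk m n f) i j v = pvMk m n (pvUpd f i j v) := by
  unfold pvSet2 pvMk pvUpd
  rw [PySem.List.getD_map_range _ _ _ _ (by omega)]
  apply List.ext_getElem
  · simp
  · intro a h1 h2
    rw [List.getElem_set]
    simp only [List.length_map, List.length_range] at h2
    split_ifs with hai
    · simp only [List.getElem_map, List.getElem_range]
      apply List.ext_getElem
      · simp
      · intro b hb1 hb2
        rw [List.getElem_set]
        simp only [List.length_map, List.length_range] at hb2
        simp only [List.getElem_map, List.getElem_range]
        split_ifs with hbj hc hc'
        · rfl
        · exfalso; omega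
        · exfalso; omega
        · subst hai; rfl
    · simp only [List.getElem_map, List.getElem_range]
      apply List.map_congr_left
      intro b hb
      rw [if_neg (by simp only [List.mem_range] at hb; omega)]


-- function-table version of A's inner-loop body, used only to state the
-- fill invariants (the port itself works on the list matrices)
def pvStepAF (k wd : List Char) (i : Int)
    (st : (Int → Int → Int) × (Int → Int → Char)) (j : Int) :
    (Int → Int → Int) × (Int → Int → Char) :=
  let dp := st.1
  let op := st.2
  let co := if PySem.Chars.lowerChar (PySem.List.pyGetD k (j-1) ' ')
               ≠ PySem.Chars.lowerChar (PySem.List.pyGetD wd (i-1) ' ')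
            then (dp (i-1) (j-1) + 1, 's') else (dp (i-1) (j-1), '0')
  let inscost := dp i (j-1) + 1
  let co := if inscost ≤ co.1 then (inscost, '+') else co
  let delcost := dp (i-1) j + 1
  let co := if delcost ≤ co.1 then (delcost, '-') else co
  (pvUpd dp i j co.1, pvUpd op i j co.2)

-- mismatch cost of cell (i, j) (1-based, Int loop indices as in the ports)
def pvC (k wd : List Char) (i j : Int) : Int :=
  if PySem.Chars.lowerChar (PySem.List.pyGetD k (j-1) ' ')
     = PySem.Chars.lowerChar (PySem.List.pyGetD wd (i-1) ' ') then 0 else 1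

-- the edit-distance recurrence both versions compute
def pvEd (k wd : List Char) : Nat → Nat → Int
  | 0, j => (j : Int)
  | i+1, 0 => (i : Int) + 1
  | i+1, j+1 =>
      min (pvEd k wd i j + pvC k wd ((i : Int)+1) ((j : Int)+1))
        (min (pvEd k wd (i+1) j + 1) (pvEd k wd i (j+1) + 1))
  termination_by i j => (i, j)

-- the alignment string of the path chosen with the delete > insert > sub/match
-- tie-break, built FORWARD (this is what B's cells carry, and what A's traceback
-- produces at (i, j))
def pvTr (k wd : List Char) : Nat → Nat → List Char
  | 0, 0 => []
  | 0, j+1 => pvTr k wd 0 j ++ ['+', PySem.List.pyGetD k (j : Int) ' ']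
  | i+1, 0 => pvTr k wd i 0 ++ ['-', PySem.List.pyGetD wd (i : Int) ' ']
  | i+1, j+1 =>
      if pvEd k wd i (j+1) + 1 ≤
          min (pvEd k wd i j + pvC k wd ((i : Int)+1) ((j : Int)+1)) (pvEd k wd (i+1) j + 1) then
        pvTr k wd i (j+1) ++ ['-', PySem.List.pyGetD wd (i : Int) ' ']
      else if pvEd k wd (i+1) j + 1 ≤ pvEd k wd i j + pvC k wd ((i : Int)+1) ((j : Int)+1) then
        pvTr k wd (i+1) j ++ ['+', PySem.List.pyGetD k (j : Int) ' ']
      else if pvC k wd ((i : Int)+1) ((j : Int)+1) = 0 then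
        pvTr k wd i j ++ [PySem.List.pyGetD wd (i : Int) ' ']
      else
        pvTr k wd i j ++ [PySem.List.pyGetD k (j : Int) ' ']
  termination_by i j => (i, j)

-- A's dp table after the boundary loops and the first r rows of the main loop
def pvDpA (k wd : List Char) (m n r : Nat) : Int → Int → Int := fun a b =>
  if 1 ≤ a ∧ a ≤ (m : Int) ∧ b = 0 then a
  else if a = 0 ∧ 0 ≤ b ∧ b ≤ (n : Int) then b
  else if 1 ≤ a ∧ a ≤ (r : Int) ∧ 1 ≤ b ∧ b ≤ (n : Int) then pvEd k wd a.toNat b.toNat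
  else 1000000

theorem pvEd_zero_left (k wd : List Char) (j : Nat) : pvEd k wd 0 j = (j : Int) := by
  cases j <;> simp [pvEd]

theorem pvEd_zero_right (k wd : List Char) (i : Nat) : pvEd k wd i 0 = (i : Int) := by
  cases i <;> simp [pvEd]

theorem pvDpA_eval (k wd : List Char) (m n r : Nat) (a b : Nat)
    (ha : a ≤ m) (hb : b ≤ n) (h : a ≤ r ∨ a = 0 ∨ b = 0) :
    pvDpA k wd m n r (a : Int) (b : Int) = pvEd k wd a b := by
  unfold pvDpA
  split_ifs with h1 h2 h3
  · have hb0 : b = 0 := by omega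
    subst hb0; rw [pvEd_zero_right]
  · have ha0 : a = 0 := by omega
    subst ha0; rw [pvEd_zero_left]
  · simp
  · exfalso; omega

theorem foldl_upd_col {α : Type} (v : Int → α) (M : Nat) (t : Int → Int → α) :
    ((PySem.List.pyRange 1 ((M : Int)+1)).foldl (fun d i => pvUpd d i 0 (v i)) t)
    = fun a b => if 1 ≤ a ∧ a ≤ (M : Int) ∧ b = 0 then v a else t a b := by
  induction M with
  | zero =>
    rw [PySem.List.pyRange_one_eq_nil (by norm_num)]
    funext a b
    simp only [List.foldl_nil]
    split_ifs with h1
    · exfalso; omega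
    · rfl
  | succ M ih =>
    have hcast : ((M+1 : Nat) : Int) + 1 = ((M : Int) + 1) + 1 := by push_cast; ring
    rw [hcast, PySem.List.pyRange_one_succ_right (by omega), List.foldl_append, ih]
    funext a b
    simp only [List.foldl_cons, List.foldl_nil, pvUpd]
    split_ifs with h1 h2 h3 <;> first
      | rfl
      | (exfalso; omega)
      | (obtain ⟨h, -⟩ := h1; rw [h])

theorem foldl_upd_row {α : Type} (v : Int → α) (M : Nat) (t : Int → Int → α) :
    ((PySem.List.pyRange 1 ((M : Int)+1)).foldl (fun d i => pvUpd d 0 i (v i)) t)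
    = fun a b => if a = 0 ∧ 1 ≤ b ∧ b ≤ (M : Int) then v b else t a b := by
  induction M with
  | zero =>
    rw [PySem.List.pyRange_one_eq_nil (by norm_num)]
    funext a b
    simp only [List.foldl_nil]
    split_ifs with h1
    · exfalso; omega
    · rfl
  | succ M ih =>
    have hcast : ((M+1 : Nat) : Int) + 1 = ((M : Int) + 1) + 1 := by push_cast; ring
    rw [hcast, PySem.List.pyRange_one_succ_right (by omega), List.foldl_append, ih]
    funext a b
    simp only [List.foldl_cons, List.foldl_nil, pvUpd]
    split_ifs with h1 h2 h3 <;> first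
      | rfl
      | (exfalso; omega)
      | (obtain ⟨-, h⟩ := h1; rw [h])

-- the op char A stores at cell (i, j), characterised from final dp values
def pvOp (k wd : List Char) (i j : Nat) : Char :=
  if i = 0 ∧ j = 0 then '0'
  else if j = 0 then '-'
  else if i = 0 then '+'
  else if pvEd k wd (i-1) j + 1 ≤
       min (pvEd k wd (i-1) (j-1) + pvC k wd (i : Int) (j : Int)) (pvEd k wd i (j-1) + 1) then '-'
  else if pvEd k wd i (j-1) + 1 ≤ pvEd k wd (i-1) (j-1) + pvC k wd (i : Int) (j : Int) then '+'
  else if pvC k wd (i : Int) (j : Int) = 0 then '0' else 's'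

-- A's op table at the same point
def pvOpA (k wd : List Char) (m n r : Nat) : Int → Int → Char := fun a b =>
  if 1 ≤ a ∧ a ≤ (m : Int) ∧ b = 0 then '-'
  else if a = 0 ∧ b = 0 then '0'
  else if a = 0 ∧ 1 ≤ b ∧ b ≤ (n : Int) then '+'
  else if 1 ≤ a ∧ a ≤ (r : Int) ∧ 1 ≤ b ∧ b ≤ (n : Int) then pvOp k wd a.toNat b.toNat
  else '?'

theorem pvOpA_eval (k wd : List Char) (m n r : Nat) (a b : Nat)
    (ha : a ≤ m) (hb : b ≤ n) (h : a ≤ r ∨ a = 0 ∨ b = 0) :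
    pvOpA k wd m n r (a : Int) (b : Int) = pvOp k wd a b := by
  unfold pvOpA
  simp only [Int.toNat_natCast]
  split_ifs with h1 h2 h3 h4
  · unfold pvOp
    rw [if_neg (by omega), if_pos (by omega)]
  · unfold pvOp
    rw [if_pos (by omega)]
  · unfold pvOp
    rw [if_neg (by omega), if_neg (by omega), if_pos (by omega)]
  · rfl
  · exfalso; omega

theorem pvStepAF_eval (k wd : List Char) (i j : Int)
    (dp : Int → Int → Int) (op : Int → Int → Char) :
    pvStepAF k wd i (dp, op) j =
    (pvUpd dp i j (min (dp (i-1) (j-1) + pvC k wd i j)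
        (min (dp i (j-1) + 1) (dp (i-1) j + 1))),
     pvUpd op i j (
       if dp (i-1) j + 1 ≤ min (dp (i-1) (j-1) + pvC k wd i j) (dp i (j-1) + 1) then '-'
       else if dp i (j-1) + 1 ≤ dp (i-1) (j-1) + pvC k wd i j then '+'
       else if pvC k wd i j = 0 then '0' else 's')) := by
  by_cases hm : PySem.Chars.lowerChar (PySem.List.pyGetD k (j-1) ' ')
      = PySem.Chars.lowerChar (PySem.List.pyGetD wd (i-1) ' ') <;>
    simp only [pvStepAF, pvC, hm, if_pos, if_neg, ne_eq, not_true_eq_false,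
      not_false_eq_true] <;>
    split_ifs <;>
    first
      | (refine congrArg₂ Prod.mk (congrArg _ ?_) (congrArg _ ?_) <;> first | rfl | omega)
      | (exfalso; omega)

theorem A_base (k wd : List Char) (m n : Nat) :
    ((PySem.List.pyRange 1 ((n : Int)+1)).foldl
      (fun st i => (pvUpd st.1 0 i i, pvUpd st.2 0 i '+'))
      ((PySem.List.pyRange 1 ((m : Int)+1)).foldl
        (fun st i => (pvUpd st.1 i 0 i, pvUpd st.2 i 0 '-'))
        (pvUpd (fun _ _ => (1000000 : Int)) 0 0 0, pvUpd (fun _ _ => '?') 0 0 '0')))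
    = (pvDpA k wd m n 0, pvOpA k wd m n 0) := by
  rw [PySem.List.foldl_prod_mk (fun (d : Int → Int → Int) (i : Int) => pvUpd d i 0 i)
        (fun (o : Int → Int → Char) (i : Int) => pvUpd o i 0 '-'),
      PySem.List.foldl_prod_mk (fun (d : Int → Int → Int) (i : Int) => pvUpd d 0 i i)
        (fun (o : Int → Int → Char) (i : Int) => pvUpd o 0 i '+'),
      foldl_upd_col, foldl_upd_col, foldl_upd_row (fun i => i), foldl_upd_row (fun _ => '+')]
  refine congrArg₂ Prod.mk ?_ ?_ <;> funext a b <;>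
    simp only [pvDpA, pvOpA, pvUpd] <;> split_ifs <;> first | rfl | omega

-- A's tables while row r+1 is partially filled up to column c
def pvDpARow (k wd : List Char) (m n r c : Nat) : Int → Int → Int := fun a b =>
  if a = (r : Int)+1 ∧ 1 ≤ b ∧ b ≤ (c : Int) then pvEd k wd (r+1) b.toNat
  else pvDpA k wd m n r a b

def pvOpARow (k wd : List Char) (m n r c : Nat) : Int → Int → Char := fun a b =>
  if a = (r : Int)+1 ∧ 1 ≤ b ∧ b ≤ (c : Int) then pvOp k wd (r+1) b.toNat
  else pvOpA k wd m n r a b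

theorem pvDpARow_eval (k wd : List Char) (m n r c : Nat) (a b : Nat)
    (ha : a ≤ m) (hb : b ≤ n)
    (h : (a ≤ r ∨ a = 0 ∨ b = 0) ∨ (a = r+1 ∧ b ≤ c)) :
    pvDpARow k wd m n r c (a : Int) (b : Int) = pvEd k wd a b := by
  unfold pvDpARow
  split_ifs with h1
  · have ha1 : a = r+1 := by omega
    subst ha1; simp
  · exact pvDpA_eval k wd m n r a b ha hb (by omega)

theorem pvDpARow_succ (k wd : List Char) (m n r c : Nat) :
    pvUpd (pvDpARow k wd m n r c) ((r : Int)+1) ((c : Int)+1) (pvEd k wd (r+1) (c+1))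
    = pvDpARow k wd m n r (c+1) := by
  funext a b
  simp only [pvUpd, pvDpARow]
  split_ifs <;> first | rfl | omega | (congr 1; omega)

theorem pvOpARow_succ (k wd : List Char) (m n r c : Nat) :
    pvUpd (pvOpARow k wd m n r c) ((r : Int)+1) ((c : Int)+1) (pvOp k wd (r+1) (c+1))
    = pvOpARow k wd m n r (c+1) := by
  funext a b
  simp only [pvUpd, pvOpARow]
  split_ifs <;> first | rfl | omega | (congr 1; omega)

theorem pvDpARow_full (k wd : List Char) (m n r : Nat) (hr : r < m) :
    pvDpARow k wd m n r n = pvDpA k wd m n (r+1) := by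
  funext a b
  simp only [pvDpARow, pvDpA]
  split_ifs <;> first | rfl | omega | (congr 2 <;> omega) | (congr 1 <;> omega)

theorem pvOpARow_full (k wd : List Char) (m n r : Nat) (hr : r < m) :
    pvOpARow k wd m n r n = pvOpA k wd m n (r+1) := by
  funext a b
  simp only [pvOpARow, pvOpA]
  split_ifs <;> first | rfl | omega | (congr 2 <;> omega) | (congr 1 <;> omega)

theorem A_row (k wd : List Char) (m n r : Nat) (hr : r < m) (c : Nat) (hc : c ≤ n) :
    ((PySem.List.pyRange 1 ((c : Int)+1)).foldl (pvStepAF k wd ((r : Int)+1))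
      (pvDpA k wd m n r, pvOpA k wd m n r))
    = (pvDpARow k wd m n r c, pvOpARow k wd m n r c) := by
  induction c with
  | zero =>
      rw [PySem.List.pyRange_one_eq_nil (by norm_num)]
      simp only [List.foldl_nil]
      refine congrArg₂ Prod.mk ?_ ?_ <;> funext a b <;>
        simp only [pvDpARow, pvOpARow] <;> rw [if_neg (by omega)]
  | succ c ih =>
      have hcast : ((c+1 : Nat) : Int) + 1 = ((c : Int) + 1) + 1 := by push_cast; ring
      rw [hcast, PySem.List.pyRange_one_succ_right (by omega), List.foldl_append,
        ih (by omega), List.foldl_cons, List.foldl_nil, pvStepAF_eval]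
      have hread1 : pvDpARow k wd m n r c ((r : Int)+1-1) ((c : Int)+1-1) = pvEd k wd r c := by
        rw [show (r : Int)+1-1 = ((r : Nat) : Int) by ring,
            show (c : Int)+1-1 = ((c : Nat) : Int) by ring]
        exact pvDpARow_eval k wd m n r c r c (by omega) (by omega) (by omega)
      have hread2 : pvDpARow k wd m n r c ((r : Int)+1) ((c : Int)+1-1) = pvEd k wd (r+1) c := by
        rw [show (r : Int)+1 = ((r+1 : Nat) : Int) by push_cast; ring,
            show (c : Int)+1-1 = ((c : Nat) : Int) by ring]
        exact pvDpARow_eval k wd m n r c (r+1) c (by omega) (by omega) (by omega)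
      have hread3 : pvDpARow k wd m n r c ((r : Int)+1-1) ((c : Int)+1) = pvEd k wd r (c+1) := by
        rw [show (r : Int)+1-1 = ((r : Nat) : Int) by ring,
            show (c : Int)+1 = ((c+1 : Nat) : Int) by push_cast; ring]
        exact pvDpARow_eval k wd m n r c r (c+1) (by omega) (by omega) (by omega)
      rw [hread1, hread2, hread3]
      have hV : min (pvEd k wd r c + pvC k wd ((r : Int)+1) ((c : Int)+1))
          (min (pvEd k wd (r+1) c + 1) (pvEd k wd r (c+1) + 1)) = pvEd k wd (r+1) (c+1) := by
        rw [pvEd]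
      have hχ : (if pvEd k wd r (c+1) + 1 ≤
            min (pvEd k wd r c + pvC k wd ((r : Int)+1) ((c : Int)+1)) (pvEd k wd (r+1) c + 1)
            then '-'
          else if pvEd k wd (r+1) c + 1 ≤ pvEd k wd r c + pvC k wd ((r : Int)+1) ((c : Int)+1)
            then '+'
          else if pvC k wd ((r : Int)+1) ((c : Int)+1) = 0 then '0' else 's')
          = pvOp k wd (r+1) (c+1) := by
        unfold pvOp
        rw [if_neg (show ¬(r+1 = 0 ∧ c+1 = 0) from by omega),
            if_neg (show ¬(c+1 = 0) from by omega),
            if_neg (show ¬(r+1 = 0) from by omega)]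
        simp only [Nat.add_sub_cancel]
        push_cast
        rfl
      rw [hV, hχ, pvDpARow_succ, pvOpARow_succ]

theorem A_outer (k wd : List Char) (m n r : Nat) (hr : r ≤ m) :
    ((PySem.List.pyRange 1 ((r : Int)+1)).foldl
      (fun st i => (PySem.List.pyRange 1 ((n : Int)+1)).foldl (pvStepAF k wd i) st)
      (pvDpA k wd m n 0, pvOpA k wd m n 0))
    = (pvDpA k wd m n r, pvOpA k wd m n r) := by
  induction r with
  | zero =>
      rw [PySem.List.pyRange_one_eq_nil (show ((0:Nat):Int)+1 ≤ 1 from by norm_num),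
        List.foldl_nil]
  | succ r ih =>
      have hcast : ((r+1 : Nat) : Int) + 1 = ((r : Int) + 1) + 1 := by push_cast; ring
      rw [hcast, PySem.List.pyRange_one_succ_right (show (1:Int) ≤ (r:Int)+1 from by omega),
        List.foldl_append,
        ih (by omega), List.foldl_cons, List.foldl_nil,
        A_row k wd m n r (by omega) n le_rfl,
        pvDpARow_full k wd m n r (by omega), pvOpARow_full k wd m n r (by omega)]

theorem pvWalkA_acc (k wd : List Char) (op : List (List Char)) (fuel : Nat) :
    ∀ (i j : Int) (res : List Char),
      pvWalkA k wd op fuel i j res = pvWalkA k wd op fuel i j [] ++ res := by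
  induction fuel with
  | zero => intro i j res; simp [pvWalkA]
  | succ fuel ih =>
      intro i j res
      simp only [pvWalkA]
      split_ifs <;> first | ((conv_rhs => rw [ih]); rw [ih]; simp) | simp

-- A's traceback from (i, j) produces exactly the forward string pvTr i j
theorem walkA_tr (k wd : List Char) (m n : Nat) (opF : List (List Char))
    (hop : ∀ a b : Nat, a ≤ m → b ≤ n → pvGet2 opF (a : Int) (b : Int) '?' = pvOp k wd a b) :
    ∀ (fuel i j : Nat), i ≤ m → j ≤ n → i + j ≤ fuel →
      pvWalkA k wd opF fuel (i : Int) (j : Int) [] = pvTr k wd i j := by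
  intro fuel
  induction fuel with
  | zero =>
      intro i j hi hj hf
      have hi0 : i = 0 := by omega
      have hj0 : j = 0 := by omega
      subst hi0; subst hj0
      simp [pvWalkA, pvTr]
  | succ fuel ih =>
      intro i j hi hj hf
      cases i with
      | zero =>
        cases j with
        | zero => simp [pvWalkA, pvTr]
        | succ j' =>
          have ej : ((j'+1 : Nat) : Int) = (j' : Int) + 1 := by push_cast; ring
          have hcond : ((0:Nat):Int) > 0 ∨ ((j'+1:Nat):Int) > 0 := by omega
          have hov : pvGet2 opF ((0:Nat):Int) ((j'+1:Nat):Int) '?' = '+' := by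
            rw [hop 0 (j'+1) (by omega) hj]; unfold pvOp
            rw [if_neg (by omega), if_neg (by omega), if_pos rfl]
          rw [pvWalkA, if_pos hcond, hov, if_neg (by decide), if_pos rfl, pvWalkA_acc]
          have e2 : ((j'+1:Nat):Int) - 1 = ((j' : Nat) : Int) := by omega
          rw [e2, ih 0 j' (by omega) (by omega) (by omega)]
          simp [pvTr]
      | succ i' =>
        cases j with
        | zero =>
          have hcond : ((i'+1:Nat):Int) > 0 ∨ ((0:Nat):Int) > 0 := by omega
          have hov : pvGet2 opF ((i'+1:Nat):Int) ((0:Nat):Int) '?' = '-' := by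
            rw [hop (i'+1) 0 hi (by omega)]; unfold pvOp
            rw [if_neg (by omega), if_pos rfl]
          rw [pvWalkA, if_pos hcond, hov, if_neg (by decide), if_neg (by decide), if_pos rfl,
            pvWalkA_acc]
          have e1 : ((i'+1:Nat):Int) - 1 = ((i' : Nat) : Int) := by omega
          rw [e1, ih i' 0 (by omega) (by omega) (by omega)]
          simp [pvTr]
        | succ j' =>
          have hcond : ((i'+1:Nat):Int) > 0 ∨ ((j'+1:Nat):Int) > 0 := by omega
          have e1 : ((i'+1:Nat):Int) - 1 = ((i' : Nat) : Int) := by omega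
          have e2 : ((j'+1:Nat):Int) - 1 = ((j' : Nat) : Int) := by omega
          have ec : pvC k wd ((i'+1 : Nat) : Int) ((j'+1 : Nat) : Int)
              = pvC k wd ((i' : Int)+1) ((j' : Int)+1) := by
            congr 1 <;> push_cast <;> ring
          have hov : pvGet2 opF ((i'+1:Nat):Int) ((j'+1:Nat):Int) '?' = pvOp k wd (i'+1) (j'+1) :=
            hop (i'+1) (j'+1) hi hj
          have hopv : pvOp k wd (i'+1) (j'+1) =
              (if pvEd k wd i' (j'+1) + 1 ≤
                  min (pvEd k wd i' j' + pvC k wd ((i' : Int)+1) ((j' : Int)+1))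
                    (pvEd k wd (i'+1) j' + 1) then '-'
               else if pvEd k wd (i'+1) j' + 1 ≤
                  pvEd k wd i' j' + pvC k wd ((i' : Int)+1) ((j' : Int)+1) then '+'
               else if pvC k wd ((i' : Int)+1) ((j' : Int)+1) = 0 then '0' else 's') := by
            unfold pvOp
            rw [if_neg (by omega), if_neg (by omega), if_neg (by omega)]
            simp only [Nat.add_sub_cancel]
            rw [show (((i'+1 : Nat) : Nat) : Int) = ((i' : Int)+1) from by push_cast; ring,
                show (((j'+1 : Nat) : Nat) : Int) = ((j' : Int)+1) from by push_cast; ring]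
          rw [pvWalkA, if_pos hcond, hov, hopv]
          by_cases hdel : pvEd k wd i' (j'+1) + 1 ≤
              min (pvEd k wd i' j' + pvC k wd ((i' : Int)+1) ((j' : Int)+1))
                (pvEd k wd (i'+1) j' + 1)
          · rw [if_pos hdel, if_neg (by decide), if_neg (by decide),
              if_pos (show ('-':Char) = '-' from rfl), pvWalkA_acc, e1,
              ih i' (j'+1) (by omega) hj (by omega)]
            rw [pvTr, if_pos hdel]
          · rw [if_neg hdel]
            by_cases hins : pvEd k wd (i'+1) j' + 1 ≤
                pvEd k wd i' j' + pvC k wd ((i' : Int)+1) ((j' : Int)+1)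
            · rw [if_pos hins, if_neg (by decide), if_pos (show ('+':Char) = '+' from rfl),
                pvWalkA_acc, e2, ih (i'+1) j' hi (by omega) (by omega)]
              rw [pvTr, if_neg hdel, if_pos hins]
            · rw [if_neg hins]
              by_cases hc : pvC k wd ((i' : Int)+1) ((j' : Int)+1) = 0
              · rw [if_pos hc, if_pos (show ('0':Char) = '0' from rfl), pvWalkA_acc,
                  e1, e2, ih i' j' (by omega) (by omega) (by omega)]
                rw [pvTr, if_neg hdel, if_neg hins, if_pos hc]
              · rw [if_neg hc, if_neg (by decide), if_neg (by decide), if_neg (by decide),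
                  if_pos (show ('s':Char) = 's' from rfl), pvWalkA_acc,
                  e1, e2, ih i' j' (by omega) (by omega) (by omega)]
                rw [pvTr, if_neg hdel, if_neg hins, if_neg hc]

-- constant matrix as pvMk
theorem pvMk_const {α : Type} (m n : Nat) (c : α) :
    List.replicate (m+1) (List.replicate (n+1) c) = pvMk m n (fun _ _ => c) := by
  simp [pvMk, List.map_const', List.length_range]

-- a fold of matrix steps tracks the fold of the corresponding table steps
theorem foldl_mat2 {α β : Type} (m n : Nat) (l : List Int)
    (stepM : (List (List α) × List (List β)) → Int → (List (List α) × List (List β)))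
    (stepF : ((Int → Int → α) × (Int → Int → β)) → Int → ((Int → Int → α) × (Int → Int → β)))
    (hcomp : ∀ (fg : (Int → Int → α) × (Int → Int → β)) (x : Int), x ∈ l →
      stepM (pvMk m n fg.1, pvMk m n fg.2) x
        = (pvMk m n (stepF fg x).1, pvMk m n (stepF fg x).2)) :
    ∀ fg0, l.foldl stepM (pvMk m n fg0.1, pvMk m n fg0.2)
      = (pvMk m n (l.foldl stepF fg0).1, pvMk m n (l.foldl stepF fg0).2) := by
  induction l with
  | nil => intro fg0; rfl
  | cons x t ih =>
      intro fg0
      simp only [List.foldl_cons]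
      rw [hcomp fg0 x (by simp)]
      exact ih (fun fg y hy => hcomp fg y (by simp [hy])) _

-- one matrix step of A's inner loop is one table step
theorem pvStepA_mat (k wd : List Char) (m n : Nat) (i j : Int)
    (hi1 : 1 ≤ i) (him : i ≤ (m : Int)) (hj1 : 1 ≤ j) (hjn : j ≤ (n : Int))
    (fg : (Int → Int → Int) × (Int → Int → Char)) :
    pvStepA k wd i (pvMk m n fg.1, pvMk m n fg.2) j
      = (pvMk m n (pvStepAF k wd i fg j).1, pvMk m n (pvStepAF k wd i fg j).2) := by
  obtain ⟨f, g⟩ := fg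
  simp only [pvStepA, pvStepAF]
  rw [pvGet2_mk m n f (i-1) (j-1) 0 (by omega) (by omega) (by omega) (by omega),
    pvGet2_mk m n f i (j-1) 0 (by omega) (by omega) (by omega) (by omega),
    pvGet2_mk m n f (i-1) j 0 (by omega) (by omega) (by omega) (by omega),
    pvSet2_mk m n f i j _ (by omega) (by omega) (by omega) (by omega),
    pvSet2_mk m n g i j _ (by omega) (by omega) (by omega) (by omega)]

-- ===== B-side lemmas =====

-- the row B's cells reach after column c of row i: (cost, forward string) pairs
def pvRow (k wd : List Char) (i c : Nat) : List (Int × List Char) :=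
  (List.range (c+1)).map (fun j => (pvEd k wd i j, pvTr k wd i j))

theorem pvRow_get (k wd : List Char) (i c b : Nat) (hb : b ≤ c) (d : Int × List Char) :
    PySem.List.pyGetD (pvRow k wd i c) ((b : Nat) : Int) d = (pvEd k wd i b, pvTr k wd i b) := by
  unfold pvRow
  rw [PySem.List.pyGetD_of_nonneg _ _ (Int.natCast_nonneg b),
    PySem.List.getD_map_range _ _ _ _ (by omega)]
  simp

theorem pvRow_succ (k wd : List Char) (i c : Nat) :
    pvRow k wd i (c+1) = pvRow k wd i c ++ [(pvEd k wd i (c+1), pvTr k wd i (c+1))] := by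
  simp [pvRow, List.range_succ]

theorem B_row0 (k wd : List Char) (n : Nat) :
    ((PySem.List.pyRange 1 ((n : Int)+1)).foldl (pvRow0Step k) [((0:Int), ([] : List Char))])
    = pvRow k wd 0 n := by
  induction n with
  | zero =>
      rw [PySem.List.pyRange_one_eq_nil (by norm_num)]
      simp [pvRow, pvEd, pvTr]
  | succ c ih =>
      have hcast : ((c+1 : Nat) : Int) + 1 = ((c : Int) + 1) + 1 := by push_cast; ring
      rw [hcast, PySem.List.pyRange_one_succ_right (by omega), List.foldl_append, ih,
        List.foldl_cons, List.foldl_nil, pvRow_succ]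
      unfold pvRow0Step
      have e2 : (c : Int) + 1 - 1 = ((c : Nat) : Int) := by ring
      rw [e2, pvRow_get k wd 0 c c le_rfl]
      refine congrArg _ (congrArg (fun x => [x]) ?_)
      refine congrArg₂ Prod.mk ?_ ?_
      · rw [pvEd_zero_left]; push_cast; ring
      · rw [show pvTr k wd 0 (c+1) = pvTr k wd 0 c ++ ['+', PySem.List.pyGetD k ((c:Nat):Int) ' '] from by rw [pvTr]]

theorem B_inner (k wd : List Char) (n r : Nat) (c : Nat) (hc : c ≤ n) :
    ((PySem.List.pyRange 1 ((c : Int)+1)).foldl (pvStepB k wd (pvRow k wd r n) ((r : Int)+1))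
      (pvRow k wd (r+1) 0))
    = pvRow k wd (r+1) c := by
  induction c with
  | zero =>
      rw [PySem.List.pyRange_one_eq_nil (by norm_num), List.foldl_nil]
  | succ c ih =>
      have hcast : ((c+1 : Nat) : Int) + 1 = ((c : Int) + 1) + 1 := by push_cast; ring
      rw [hcast, PySem.List.pyRange_one_succ_right (by omega), List.foldl_append,
        ih (by omega), List.foldl_cons, List.foldl_nil]
      unfold pvStepB
      have e1 : (r : Int) + 1 - 1 = ((r : Nat) : Int) := by ring
      have e2 : (c : Int) + 1 - 1 = ((c : Nat) : Int) := by ring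
      have e3 : (c : Int) + 1 = ((c + 1 : Nat) : Int) := by push_cast; ring
      rw [e1, e2]
      rw [pvRow_get k wd r n c (by omega), pvRow_get k wd (r+1) c c le_rfl]
      rw [show PySem.List.pyGetD (pvRow k wd r n) ((c : Int)+1) ((0:Int), ([] : List Char))
            = (pvEd k wd r (c+1), pvTr k wd r (c+1)) from by
          rw [e3]; exact pvRow_get k wd r n (c+1) (by omega) _]
      have ec : pvC k wd ((r : Int)+1) ((c : Int)+1)
          = if PySem.Chars.lowerChar (PySem.List.pyGetD k ((c:Nat):Int) ' ')
               = PySem.Chars.lowerChar (PySem.List.pyGetD wd ((r:Nat):Int) ' ')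
            then (0:Int) else 1 := by
        unfold pvC; rw [show (r : Int)+1-1 = ((r:Nat):Int) from by ring,
          show (c : Int)+1-1 = ((c:Nat):Int) from by ring]
      have hVal : pvEd k wd (r+1) (c+1)
          = min (pvEd k wd r c + pvC k wd ((r : Int)+1) ((c : Int)+1))
              (min (pvEd k wd (r+1) c + 1) (pvEd k wd r (c+1) + 1)) := by rw [pvEd]
      have hTr : pvTr k wd (r+1) (c+1)
          = (if pvEd k wd r (c+1) + 1 ≤
                min (pvEd k wd r c + pvC k wd ((r : Int)+1) ((c : Int)+1))
                  (pvEd k wd (r+1) c + 1) then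
               pvTr k wd r (c+1) ++ ['-', PySem.List.pyGetD wd ((r:Nat):Int) ' ']
             else if pvEd k wd (r+1) c + 1 ≤ pvEd k wd r c + pvC k wd ((r : Int)+1) ((c : Int)+1) then
               pvTr k wd (r+1) c ++ ['+', PySem.List.pyGetD k ((c:Nat):Int) ' ']
             else if pvC k wd ((r : Int)+1) ((c : Int)+1) = 0 then
               pvTr k wd r c ++ [PySem.List.pyGetD wd ((r:Nat):Int) ' ']
             else
               pvTr k wd r c ++ [PySem.List.pyGetD k ((c:Nat):Int) ' ']) := by rw [pvTr]
      rw [pvRow_succ, hVal, hTr]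
      by_cases hmc : PySem.Chars.lowerChar (PySem.List.pyGetD k ((c:Nat):Int) ' ')
          = PySem.Chars.lowerChar (PySem.List.pyGetD wd ((r:Nat):Int) ' ') <;>
        simp only [beq_iff_eq, hmc, if_pos, if_neg, not_false_eq_true, ec] <;>
        split_ifs <;>
        first
          | (refine congrArg _ (congrArg (fun x => [x]) (congrArg₂ Prod.mk ?_ ?_)) <;>
              first | rfl | omega)
          | (exfalso; omega)

theorem B_outer (k wd : List Char) (n : Nat) (r : Nat) :
    ((PySem.List.pyRange 1 ((r : Int)+1)).foldl
      (fun prev i => (PySem.List.pyRange 1 ((n : Int)+1)).foldl (pvStepB k wd prev i)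
        [(i, (PySem.List.pyGetD prev 0 ((0:Int), ([] : List Char))).2
              ++ ['-', PySem.List.pyGetD wd (i-1) ' '])])
      (pvRow k wd 0 n))
    = pvRow k wd r n := by
  induction r with
  | zero =>
      rw [PySem.List.pyRange_one_eq_nil (show ((0:Nat):Int)+1 ≤ 1 from by norm_num),
        List.foldl_nil]
  | succ r ih =>
      have hcast : ((r+1 : Nat) : Int) + 1 = ((r : Int) + 1) + 1 := by push_cast; ring
      rw [hcast, PySem.List.pyRange_one_succ_right (show (1:Int) ≤ (r:Int)+1 from by omega),
        List.foldl_append, ih, List.foldl_cons, List.foldl_nil]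
      have e1 : (r : Int) + 1 - 1 = ((r : Nat) : Int) := by ring
      have h0 : PySem.List.pyGetD (pvRow k wd r n) (((0:Nat):Int)) ((0:Int), ([] : List Char))
          = (pvEd k wd r 0, pvTr k wd r 0) := pvRow_get k wd r n 0 (by omega) _
      rw [show ((0:Int)) = (((0:Nat)):Int) from by norm_num] at *
      rw [e1, h0]
      have hcur0 : [((r : Int)+1, (pvEd k wd r 0, pvTr k wd r 0).2
            ++ ['-', PySem.List.pyGetD wd ((r:Nat):Int) ' '])]
          = pvRow k wd (r+1) 0 := by
        unfold pvRow
        simp only [List.map_nil, Nat.cast_ofNat]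
        refine congrArg (fun x => [x]) (congrArg₂ Prod.mk ?_ ?_)
        · rw [pvEd_zero_right]; push_cast; ring
        · rw [show pvTr k wd (r+1) 0 = pvTr k wd r 0 ++ ['-', PySem.List.pyGetD wd ((r:Nat):Int) ' '] from by rw [pvTr]]
      rw [hcur0, B_inner k wd n r n le_rfl]

theorem main_eq (key search_wd : String) :
    getOperations key search_wd = getOperations_alt key search_wd := by
  simp only [getOperations, getOperations_alt]
  set k := key.toList with hk
  set wd := search_wd.toList with hwd
  set m := wd.length with hm
  set n := k.length with hn
  -- A side: reduce the two list-matrices to the invariant tables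
  rw [pvMk_const m n (1000000:Int), pvMk_const m n '?',
    pvSet2_mk m n _ 0 0 (0:Int) (by omega) (by omega) (by omega) (by omega),
    pvSet2_mk m n _ 0 0 '0' (by omega) (by omega) (by omega) (by omega)]
  rw [foldl_mat2 m n _ _
      (fun st i => (pvUpd st.1 i 0 i, pvUpd st.2 i 0 '-'))
      (fun fg x hx => by
        have hb := PySem.List.mem_pyRange_one.mp hx
        show (pvSet2 (pvMk m n fg.1) x 0 x, pvSet2 (pvMk m n fg.2) x 0 '-') = _
        rw [pvSet2_mk m n fg.1 x 0 x (by omega) (by omega) (by omega) (by omega),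
          pvSet2_mk m n fg.2 x 0 '-' (by omega) (by omega) (by omega) (by omega)])
      (pvUpd (fun _ _ => (1000000:Int)) 0 0 0, pvUpd (fun _ _ => '?') 0 0 '0')]
  rw [foldl_mat2 m n _ _
      (fun fg i => (pvUpd fg.1 0 i i, pvUpd fg.2 0 i '+'))
      (fun fg x hx => by
        have hb := PySem.List.mem_pyRange_one.mp hx
        show (pvSet2 (pvMk m n fg.1) 0 x x, pvSet2 (pvMk m n fg.2) 0 x '+') = _
        rw [pvSet2_mk m n fg.1 0 x x (by omega) (by omega) (by omega) (by omega),
          pvSet2_mk m n fg.2 0 x '+' (by omega) (by omega) (by omega) (by omega)])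
      _]
  rw [foldl_mat2 m n _ _
      (fun fg i => (PySem.List.pyRange 1 ((n:Int)+1)).foldl (pvStepAF k wd i) fg)
      (fun fg x hx => by
        have hb := PySem.List.mem_pyRange_one.mp hx
        exact foldl_mat2 m n _ _ (pvStepAF k wd x)
          (fun fg' y hy => by
            have hb2 := PySem.List.mem_pyRange_one.mp hy
            exact pvStepA_mat k wd m n x y (by omega) (by omega) (by omega) (by omega) fg')
          fg)
      _]
  rw [A_base k wd m n, A_outer k wd m n m le_rfl]
  simp only [Prod.snd]
  -- B side: the rolling rows are (pvEd, pvTr) pairs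
  rw [B_row0 k wd n, B_outer k wd n m]
  have hop : ∀ a b : Nat, a ≤ m → b ≤ n →
      pvGet2 (pvMk m n (pvOpA k wd m n m)) (a : Int) (b : Int) '?' = pvOp k wd a b := by
    intro a b ha hb
    rw [pvGet2_mk m n _ _ _ _ (by omega) (by omega) (by omega) (by omega)]
    exact pvOpA_eval k wd m n m a b ha hb (Or.inl ha)
  have hwalk := walkA_tr k wd m n _ hop (((m : Int) + (n : Int)).toNat) m n le_rfl le_rfl
    (by omega)
  have hfin : PySem.List.pyGetD (pvRow k wd m n) ((n : Nat) : Int) ((0:Int), ([] : List Char))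
      = (pvEd k wd m n, pvTr k wd m n) := pvRow_get k wd m n n le_rfl _
  rw [hfin, hwalk]
  refine congrArg₂ Prod.mk rfl ?_
  rw [pvGet2_mk m n _ _ _ _ (by omega) (by omega) (by omega) (by omega),
    pvDpA_eval _ _ _ _ _ _ _ le_rfl le_rfl (Or.inl le_rfl)]

-- ===== VERDICT (by name: the statement is the Claim_ definition above) =====
theorem getOperations_spec : Claim_equal_getOperations := by
  intro key search_wd _
  unfold Spec_getOperations
  exact main_eq key search_wd
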